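-- pv_equiv track=rewrite | github.com/Haitam-Hansali/TP_Maths | TP_Maths.py | blocs
-- ===== SOURCE A (Python) =====
-- def dimensions(A):
--     i = len(A[0])
--     j = len(A)
--     return j,i
--
-- def matriceNulle(n,p):
--     return [[0 for j in range(p)] for i in range(n)]
--
-- def blocs(A, a, b):
--     n,p = dimensions(A)
--     assert n == p
--     B = matriceNulle(n*a, n*b)
--     for j in range(len(B)):
--         for k in range(len(B[0])):
--             B[j][k] = A[j%n][k%n]
--     return B
--
-- A = [[0, 1], [1, 1]]
-- ===== SOURCE B (Python) =====
-- def dimensions(A):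
--     i = len(A[0])
--     j = len(A)
--     return j,i
--
-- def blocs(A, a, b):
--     n, p = dimensions(A)
--     assert n == p
--     tiled = [row[:n] * b for row in A]
--     return [tiled[i % n][:] for i in range(n * a)]
-- ===== Notes on version B (the rewrite author's own statement) =====
-- stated objective: simpler
-- what changed: B builds each tiled row once by slicing and replicating the source row (row[:n]*b) and then copies row templates vertically, instead of A's zero-matrix allocation followed by element-wise double-modulo assignment.
import Mathlib
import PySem

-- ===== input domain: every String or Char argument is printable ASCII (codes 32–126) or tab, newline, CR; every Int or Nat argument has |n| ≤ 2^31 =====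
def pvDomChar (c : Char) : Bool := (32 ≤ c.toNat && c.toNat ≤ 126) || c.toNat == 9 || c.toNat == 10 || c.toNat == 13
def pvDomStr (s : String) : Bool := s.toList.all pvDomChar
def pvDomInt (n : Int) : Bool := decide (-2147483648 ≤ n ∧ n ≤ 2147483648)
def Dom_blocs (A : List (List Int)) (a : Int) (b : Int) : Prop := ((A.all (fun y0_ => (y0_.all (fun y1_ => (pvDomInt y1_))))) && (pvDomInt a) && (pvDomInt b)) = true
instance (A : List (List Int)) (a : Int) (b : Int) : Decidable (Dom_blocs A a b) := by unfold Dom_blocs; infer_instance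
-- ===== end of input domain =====

-- B tiles each source row once by slicing and replicating it (row[:n]*b) and then copies
-- row templates vertically, instead of A's element-wise double-modulo assignment: simpler.

-- ===== PORT A =====
-- A allocates a zero matrix of shape (n*a, n*b) and overwrites EVERY cell with A[j%n][k%n];
-- ported as a map over both index ranges (each cell of the zero matrix is written exactly once).
-- The 'assert n == p' and the indexing raise outside Pre_blocs; there the port's value is unclaimed.
def blocs (A : List (List Int)) (a : Int) (b : Int) : List (List Int) :=
  let n : Int := A.length
  (PySem.List.pyRange 0 (n * a) 1).map (fun j =>
    (PySem.List.pyRange 0 (n * b) 1).map (fun k =>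
      PySem.List.pyGetD (PySem.List.pyGetD A (PySem.Int.mod j n) []) (PySem.Int.mod k n) 0))

-- ===== PORT B =====
def blocs_alt (A : List (List Int)) (a : Int) (b : Int) : List (List Int) :=
  let n : Int := A.length
  let tiled := A.map (fun row => (List.replicate b.toNat (PySem.List.slice row none (some n))).flatten)
  (PySem.List.pyRange 0 (n * a) 1).map (fun i => PySem.List.pyGetD tiled (PySem.Int.mod i n) [])

-- ===== PRECONDITION & SPEC =====
-- Pre_blocs is exactly where the Python A returns: A nonempty, the assert len(A) == len(A[0])
-- holds, and — only when both loops actually run (a > 0 and b > 0) — every row is long enough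
-- for the index k % n (otherwise A raises IndexError).
def Pre_blocs (A : List (List Int)) (a : Int) (b : Int) : Prop :=
  A ≠ [] ∧ A.headI.length = A.length ∧
    (0 < a → 0 < b → ∀ r ∈ A, A.length ≤ r.length)
instance (A : List (List Int)) (a : Int) (b : Int) : Decidable (Pre_blocs A a b) := by
  unfold Pre_blocs; infer_instance
def pvWitness_blocs : List (List Int) × Int × Int := ([[0, 1], [1, 1]], 2, 2)

def Spec_blocs (A : List (List Int)) (a : Int) (b : Int) (out : List (List Int)) : Prop := out = blocs_alt A a b
instance (A : List (List Int)) (a : Int) (b : Int) (out : List (List Int)) : Decidable (Spec_blocs A a b out) := by unfold Spec_blocs; infer_instance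

-- ===== CLAIM (what is proved, stated in full; the proofs are below) =====
def Claim_equal_blocs : Prop := ∀ (A : List (List Int)) (a : Int) (b : Int), Dom_blocs A a b → Pre_blocs A a b → Spec_blocs A a b (blocs A a b)

-- ===== LEMMAS AND PROOFS =====

-- one tiled row: reading row[k % m] for k < m*B is B copies of the first m entries
lemma tile_row (row : List Int) (m B : Nat) (hm : 0 < m) (hlen : m ≤ row.length) :
    (PySem.List.pyRange 0 ((m : Int) * (B : Int)) 1).map
        (fun k => PySem.List.pyGetD row (PySem.Int.mod k (m : Int)) 0)
      = (List.replicate B (row.take m)).flatten := by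
  induction B with
  | zero => simp [PySem.List.pyRange_one_eq_nil]
  | succ B ih =>
    have hsplit : PySem.List.pyRange 0 ((m : Int) * ((B + 1 : Nat) : Int)) 1
        = PySem.List.pyRange 0 ((m : Int) * (B : Int)) 1
          ++ PySem.List.pyRange ((m : Int) * (B : Int)) ((m : Int) * (B : Int) + (m : Int)) 1 := by
      have h2 : ((m : Int) * ((B + 1 : Nat) : Int)) = (m : Int) * (B : Int) + (m : Int) := by
        push_cast; ring
      rw [h2]
      exact PySem.List.pyRange_one_append 0 ((m : Int) * (B : Int)) _ (by positivity)
        (by omega)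
    rw [hsplit, List.map_append, ih, List.replicate_succ', List.flatten_append,
      List.flatten_cons, List.flatten_nil, List.append_nil]
    congr 1
    apply List.ext_getElem
    · simp [PySem.List.length_pyRange_one]
      omega
    · intro i h1 h2
      simp only [List.length_map, PySem.List.length_pyRange_one] at h1
      have hi : i < m := by omega
      rw [List.getElem_map, PySem.List.getElem_pyRange_one]
      have hmod : PySem.Int.mod ((m : Int) * (B : Int) + (i : Int)) (m : Int) = (i : Int) := by
        rw [PySem.Int.mod_eq_emod_of_pos (by exact_mod_cast hm)]
        rw [add_comm, Int.add_mul_emod_self_left]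
        exact Int.emod_eq_of_lt (by positivity) (by exact_mod_cast hi)
      rw [hmod, PySem.List.pyGetD_natCast, List.getElem_take,
        List.getD_eq_getElem row 0 (by omega)]

-- ===== VERDICT (by name: the statement is the Claim_ definition above) =====
theorem blocs_spec : Claim_equal_blocs := by
  intro A a b _hDom hPre
  obtain ⟨hne, _hsq, hrows⟩ := hPre
  unfold Spec_blocs blocs blocs_alt
  simp only []
  apply List.map_congr_left
  intro j hj
  rw [PySem.List.mem_pyRange_one] at hj
  have hn : 0 < (A.length : Int) := by
    have := List.length_pos_iff.mpr hne; exact_mod_cast this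
  have ha : 0 < a := by nlinarith [hj.1, hj.2]
  have hm0 : 0 ≤ PySem.Int.mod j (A.length : Int) := PySem.Int.mod_nonneg _ hn
  have hmlt : PySem.Int.mod j (A.length : Int) < (A.length : Int) := PySem.Int.mod_lt _ hn
  set m := PySem.Int.mod j (A.length : Int) with hmdef
  have hmnat : m.toNat < A.length := by omega
  rw [PySem.List.pyGetD_eq_getElem A [] hm0 (by exact_mod_cast hmlt),
      PySem.List.pyGetD_eq_getElem _ [] hm0 (by simpa using hmlt),
      List.getElem_map]
  by_cases hb : 0 < b
  · have hlen : A.length ≤ A[m.toNat].length :=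
      hrows ha hb _ (List.getElem_mem hmnat)
    have hslice : PySem.List.slice A[m.toNat] none (some (A.length : Int))
        = A[m.toNat].take A.length := by
      rw [PySem.List.slice_to _ (by positivity)]; simp
    rw [hslice]
    have := tile_row A[m.toNat] A.length b.toNat (List.length_pos_iff.mpr hne) hlen
    rw [show ((A.length : Int) * b) = ((A.length : Int) * (b.toNat : Int)) by congr 1; omega] at *
    exact this
  · have hzero : b.toNat = 0 := by omega
    have : (A.length : Int) * b ≤ 0 := by nlinarith
    simp [PySem.List.pyRange_one_eq_nil this, hzero]
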